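-- pv_equiv track=rewrite | github.com/gonglini/practice | programmers/strange.py | solution
-- ===== SOURCE A (Python) =====
-- def solution(s):
--     result = []
--     cnt = 0
--
--     for c in s:
--         if c == ' ':
--             result.append(' ')
--             cnt = 0
--         else:
--             if cnt % 2 == 0:
--                 result.append(c.upper())
--             else:
--                 result.append(c.lower())
--             cnt+= 1
--
--     return ''.join(result)
-- ===== SOURCE B (Python) =====
-- def solution(s):
--     words = s.split(' ')
--     return ' '.join(
--         ''.join(c.upper() if i % 2 == 0 else c.lower() for i, c in enumerate(w))
--         for w in words
--     )
-- ===== Notes on version B (the rewrite author's own statement) =====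
-- stated objective: idiomatic
-- what changed: Replaces A's flat character loop with a manual counter reset on spaces by a single-space split, a per-word enumerate-indexed case toggle, and a space-join, removing the mutable counter state entirely.
import Mathlib
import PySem

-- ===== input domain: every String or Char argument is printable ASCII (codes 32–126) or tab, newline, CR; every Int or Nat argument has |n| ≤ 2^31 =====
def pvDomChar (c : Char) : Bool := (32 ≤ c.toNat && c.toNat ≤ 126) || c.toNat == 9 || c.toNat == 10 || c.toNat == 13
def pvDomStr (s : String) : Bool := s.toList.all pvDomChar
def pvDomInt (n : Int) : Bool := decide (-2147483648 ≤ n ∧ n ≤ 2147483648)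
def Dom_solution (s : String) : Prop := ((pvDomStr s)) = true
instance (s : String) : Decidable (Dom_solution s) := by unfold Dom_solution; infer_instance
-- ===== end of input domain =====

-- B replaces A's flat char loop with manual counter resets by a single-space split, a per-word indexed toggle, and a space-join (idiomatic decomposition, same cost).

-- ===== PORT A =====
-- the loop body: state is (result, cnt) exactly as in the Python
def solStep (st : List Char × Int) (c : Char) : List Char × Int :=
  if c = ' ' then (st.1 ++ [' '], 0)
  else if PySem.Int.mod st.2 2 = 0 then (st.1 ++ [PySem.Chars.upperChar c], st.2 + 1)
  else (st.1 ++ [PySem.Chars.lowerChar c], st.2 + 1)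

def solution (s : String) : String :=
  String.mk (s.toList.foldl solStep ([], 0)).1

-- ===== PORT B =====
-- ''.join(c.upper() if i % 2 == 0 else c.lower() for i, c in enumerate(w))
def toggleWord (w : List Char) : List Char :=
  (PySem.List.enumerate w).map
    (fun p => if PySem.Int.mod p.1 2 = 0 then PySem.Chars.upperChar p.2 else PySem.Chars.lowerChar p.2)

def solution_alt (s : String) : String :=
  String.mk (PySem.Chars.join [' '] ((PySem.Chars.splitOn s.toList [' ']).map toggleWord))

-- ===== PRECONDITION & SPEC =====
def Spec_solution (s : String) (out : String) : Prop := out = solution_alt s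
instance (s : String) (out : String) : Decidable (Spec_solution s out) := by unfold Spec_solution; infer_instance

-- ===== CLAIM (what is proved, stated in full; the proofs are below) =====
def Claim_equal_solution : Prop := ∀ (s : String), Dom_solution s → Spec_solution s (solution s)

-- ===== LEMMAS AND PROOFS =====

-- structural model of split(' ')
def splitSp : List Char → List (List Char)
  | [] => [[]]
  | c :: cs => if c = ' ' then [] :: splitSp cs
               else match splitSp cs with
                    | [] => [[c]]
                    | w :: ws => (c :: w) :: ws

lemma splitSp_ne_nil (cs : List Char) : splitSp cs ≠ [] := by
  cases cs with
  | nil => simp [splitSp]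
  | cons c cs =>
    simp only [splitSp]
    split_ifs
    · simp
    · cases h : splitSp cs <;> simp

-- prepend p onto the first block
def prepHd (p : List Char) : List (List Char) → List (List Char)
  | [] => [p]
  | w :: ws => (p ++ w) :: ws

lemma go_eq (fuel : Nat) : ∀ (l cur : List Char) (acc : List (List Char)), l.length ≤ fuel →
    PySem.Chars.splitOn.go [' '] fuel l cur acc = acc.reverse ++ prepHd cur.reverse (splitSp l) := by
  induction fuel with
  | zero =>
    intro l cur acc h
    have : l = [] := by cases l <;> simp_all
    subst this
    rw [PySem.Chars.splitOn.go.eq_def]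
    simp [splitSp, prepHd]
  | succ n ih =>
    intro l cur acc h
    cases l with
    | nil =>
      rw [PySem.Chars.splitOn.go.eq_def]
      simp [splitSp, prepHd]
    | cons c rest =>
      rw [PySem.Chars.splitOn.go.eq_def]
      by_cases hc : c = ' '
      · subst hc
        have hpre : [' '].isPrefixOf (' ' :: rest) = true := by simp [List.isPrefixOf]
        simp only [hpre, if_true, List.length_cons] at *
        rw [show List.drop (List.length [] + 1) (' ' :: rest) = rest from rfl]
        rw [ih rest [] (cur.reverse :: acc) (by omega)]
        rcases hne : splitSp rest with _ | ⟨w, ws⟩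
        · exact absurd hne (splitSp_ne_nil rest)
        · simp [splitSp, prepHd, hne]
      · have hpre : [' '].isPrefixOf (c :: rest) = false := by
          have : (' ' == c) = false := by simpa [beq_iff_eq] using fun h' => hc h'.symm
          simp [List.isPrefixOf, this]
        simp only [hpre, Bool.false_eq_true, if_false, List.length_cons] at *
        rw [ih rest (c :: cur) acc (by omega)]
        rcases hne : splitSp rest with _ | ⟨w, ws⟩
        · exact absurd hne (splitSp_ne_nil rest)
        · simp [splitSp, prepHd, hne, hc]

lemma splitOn_eq_splitSp (cs : List Char) : PySem.Chars.splitOn cs [' '] = splitSp cs := by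
  unfold PySem.Chars.splitOn
  rw [go_eq (cs.length + 1) cs [] [] (by omega)]
  rcases hne : splitSp cs with _ | ⟨w, ws⟩
  · exact absurd hne (splitSp_ne_nil cs)
  · simp [prepHd]

-- the char A emits at counter cnt
def tog (cnt : Int) (c : Char) : Char :=
  if PySem.Int.mod cnt 2 = 0 then PySem.Chars.upperChar c else PySem.Chars.lowerChar c

-- A's loop output from counter cnt, structurally
def gA : List Char → Int → List Char
  | [], _ => []
  | c :: cs, cnt => if c = ' ' then ' ' :: gA cs 0 else tog cnt c :: gA cs (cnt + 1)

lemma foldl_solStep (cs : List Char) : ∀ (acc : List Char) (cnt : Int),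
    (cs.foldl solStep (acc, cnt)).1 = acc ++ gA cs cnt := by
  induction cs with
  | nil => intro acc cnt; simp [gA]
  | cons c cs ih =>
    intro acc cnt
    rw [List.foldl_cons]
    by_cases hc : c = ' '
    · subst hc
      rw [show solStep (acc, cnt) ' ' = (acc ++ [' '], 0) from by simp [solStep]]
      rw [ih]; simp [gA]
    · by_cases hm : PySem.Int.mod cnt 2 = 0
      · rw [show solStep (acc, cnt) c = (acc ++ [PySem.Chars.upperChar c], cnt + 1) from by
          simp only [solStep, if_neg hc, if_pos hm]]
        rw [ih]
        simp only [gA, if_neg hc, tog, if_pos hm, List.append_assoc, List.singleton_append]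
      · rw [show solStep (acc, cnt) c = (acc ++ [PySem.Chars.lowerChar c], cnt + 1) from by
          simp only [solStep, if_neg hc, if_neg hm]]
        rw [ih]
        simp only [gA, if_neg hc, tog, if_neg hm, List.append_assoc, List.singleton_append]

-- toggle a word with the index starting at k
def togFrom (w : List Char) (k : Int) : List Char :=
  (PySem.List.enumerate w k).map (fun p => tog p.1 p.2)

lemma toggleWord_eq : toggleWord = (togFrom · 0) := by
  funext w
  simp [toggleWord, togFrom, tog]

lemma join_cons_head (sep x : List Char) (c : Char) (ys : List (List Char)) :
    PySem.Chars.join sep ((c :: x) :: ys) = c :: PySem.Chars.join sep (x :: ys) := by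
  cases ys with
  | nil => simp [PySem.Chars.join_singleton]
  | cons y ys => simp [PySem.Chars.join_cons_cons]

lemma gA_eq_join (cs : List Char) : ∀ (k : Int) (w : List Char) (ws : List (List Char)),
    splitSp cs = w :: ws →
    gA cs k = PySem.Chars.join [' '] (togFrom w k :: ws.map (togFrom · 0)) := by
  induction cs with
  | nil =>
    intro k w ws h
    simp only [splitSp, List.cons.injEq] at h
    obtain ⟨hw, hws⟩ := h
    subst hw; subst hws
    simp [gA, PySem.Chars.join_singleton, togFrom, PySem.List.enumerate_nil]
  | cons c cs ih =>
    intro k w ws h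
    rcases hne : splitSp cs with _ | ⟨w', ws'⟩
    · exact absurd hne (splitSp_ne_nil cs)
    · by_cases hc : c = ' '
      · subst hc
        rw [show splitSp (' ' :: cs) = [] :: w' :: ws' from by simp [splitSp, hne]] at h
        obtain ⟨hw, hws⟩ := List.cons.inj h
        subst hw; subst hws
        rw [show gA (' ' :: cs) k = ' ' :: gA cs 0 from by simp [gA]]
        rw [ih 0 w' ws' hne, List.map_cons, PySem.Chars.join_cons_cons]
        simp [togFrom, PySem.List.enumerate_nil]
      · rw [show splitSp (c :: cs) = (c :: w') :: ws' from by simp [splitSp, hne, hc]] at h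
        obtain ⟨hw, hws⟩ := List.cons.inj h
        subst hw; subst hws
        rw [show gA (c :: cs) k = tog k c :: gA cs (k + 1) from by simp [gA, hc]]
        rw [ih (k + 1) w' ws' hne]
        have henum : togFrom (c :: w') k = tog k c :: togFrom w' (k + 1) := by
          simp [togFrom, PySem.List.enumerate_cons]
        rw [henum, join_cons_head]

-- ===== VERDICT (by name: the statement is the Claim_ definition above) =====
theorem solution_spec : Claim_equal_solution := by
  intro s _
  unfold Spec_solution solution solution_alt
  rw [foldl_solStep, List.nil_append, splitOn_eq_splitSp]
  rcases hne : splitSp s.toList with _ | ⟨w, ws⟩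
  · exact absurd hne (splitSp_ne_nil s.toList)
  · rw [gA_eq_join s.toList 0 w ws hne, List.map_cons, toggleWord_eq]
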